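-- pv_equiv track=rewrite | github.com/FSSCoding/gitAST | src/gitast/deps.py | diff_deps
-- ===== SOURCE A (Python) =====
-- from typing import Dict, List, Optional, Tuple
--
-- def diff_deps(before: Dict[str, str], after: Dict[str, str]) -> List[Tuple[str, str, Optional[str], Optional[str]]]:
--     """Diff two dependency dicts. Returns list of (package, change_type, old_version, new_version).
--
--     change_type: 'added', 'removed', 'bumped'
--     """
--     changes = []
--     all_pkgs = set(before.keys()) | set(after.keys())
--
--     for pkg in sorted(all_pkgs):
--         old = before.get(pkg)
--         new = after.get(pkg)
--
--         if old is None and new is not None: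
--             changes.append((pkg, 'added', None, new))
--         elif old is not None and new is None:
--             changes.append((pkg, 'removed', old, None))
--         elif old != new:
--             changes.append((pkg, 'bumped', old, new))
--
--     return changes
-- ===== SOURCE B (Python) =====
-- def diff_deps(before, after):
--     """Diff two dependency dicts via three disjoint groups, then one sort by package."""
--     added = [(pkg, 'added', None, new) for pkg, new in after.items() if pkg not in before]
--     removed = [(pkg, 'removed', old, None) for pkg, old in before.items() if pkg not in after]
--     bumped = [(pkg, 'bumped', old, after[pkg]) for pkg, old in before.items()
--               if pkg in after and after[pkg] != old]
--     return sorted(added + removed + bumped, key=lambda c: c[0])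
-- ===== Notes on version B (the rewrite author's own statement) =====
-- stated objective: alternative
-- what changed: Replaces the per-key branching loop over sorted(union of key sets) by three independent group comprehensions (added/removed/bumped) over the dicts themselves, concatenated and sorted once by package name.
import Mathlib
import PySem

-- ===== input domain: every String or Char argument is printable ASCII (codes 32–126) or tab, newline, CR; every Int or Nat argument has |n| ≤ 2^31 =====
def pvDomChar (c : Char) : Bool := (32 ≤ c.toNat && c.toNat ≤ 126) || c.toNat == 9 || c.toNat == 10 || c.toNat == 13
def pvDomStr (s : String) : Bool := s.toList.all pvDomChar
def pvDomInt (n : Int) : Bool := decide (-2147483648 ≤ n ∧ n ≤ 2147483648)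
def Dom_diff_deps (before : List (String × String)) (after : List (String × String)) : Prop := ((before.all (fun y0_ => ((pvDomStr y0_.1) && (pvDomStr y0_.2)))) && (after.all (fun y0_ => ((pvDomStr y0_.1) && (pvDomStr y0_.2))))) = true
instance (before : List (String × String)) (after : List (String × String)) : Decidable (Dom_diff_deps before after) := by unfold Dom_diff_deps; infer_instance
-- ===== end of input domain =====

-- B replaces A's single per-key branching loop over the sorted union of both key sets by
-- three independent group comprehensions (added/removed/bumped) over the dicts
-- themselves, concatenated and sorted once by package name (objective: alternative).
-- ===== PORT A =====
def diff_deps (before : List (String × String)) (after : List (String × String)) : List (String × String × Option String × Option String) :=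
  let b := PySem.Dict.mk before
  let a := PySem.Dict.mk after
  let all_pkgs := PySem.Set.union (PySem.Set.ofList b.keys) (PySem.Set.ofList a.keys)
  (PySem.List.sorted all_pkgs (fun x => x) false).foldl
    (fun changes pkg =>
      let old := b.get? pkg
      let new := a.get? pkg
      if old = none ∧ ¬ new = none then changes ++ [(pkg, "added", none, new)]
      else if ¬ old = none ∧ new = none then changes ++ [(pkg, "removed", old, none)]
      else if old ≠ new then changes ++ [(pkg, "bumped", old, new)]
      else changes) []

-- ===== PORT B =====
def diff_deps_alt (before : List (String × String)) (after : List (String × String)) : List (String × String × Option String × Option String) :=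
  let b := PySem.Dict.mk before
  let a := PySem.Dict.mk after
  let added := (after.filter (fun p => !(b.contains p.1))).map
    (fun p => (p.1, "added", (none : Option String), some p.2))
  let removed := (before.filter (fun p => !(a.contains p.1))).map
    (fun p => (p.1, "removed", some p.2, (none : Option String)))
  let bumped := (before.filter (fun p => a.contains p.1 && !(a.get? p.1 == some p.2))).map
    (fun p => (p.1, "bumped", some p.2, a.get? p.1))
  PySem.List.sorted (added ++ removed ++ bumped) (fun c => c.1) false

-- ===== PRECONDITION & SPEC =====
-- The association lists stand for Python dicts, whose keys are necessarily unique;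
-- Pre_ admits exactly the lists that represent a Python dict (no duplicate keys).
def Pre_diff_deps (before : List (String × String)) (after : List (String × String)) : Prop :=
  (before.map Prod.fst).Nodup ∧ (after.map Prod.fst).Nodup
instance (before : List (String × String)) (after : List (String × String)) : Decidable (Pre_diff_deps before after) := by unfold Pre_diff_deps; infer_instance
def pvWitness_diff_deps : (List (String × String)) × (List (String × String)) :=
  ([("a", "1"), ("b", "2"), ("c", "3")], [("b", "2"), ("c", "9"), ("d", "4")])
def Spec_diff_deps (before : List (String × String)) (after : List (String × String)) (out : List (String × String × Option String × Option String)) : Prop := out = diff_deps_alt before after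
instance (before : List (String × String)) (after : List (String × String)) (out : List (String × String × Option String × Option String)) : Decidable (Spec_diff_deps before after out) := by unfold Spec_diff_deps; infer_instance

-- ===== CLAIM (what is proved, stated in full; the proofs are below) =====
def Claim_equal_diff_deps : Prop := ∀ (before : List (String × String)) (after : List (String × String)), Dom_diff_deps before after → Pre_diff_deps before after → Spec_diff_deps before after (diff_deps before after)

-- ===== LEMMAS AND PROOFS =====

def pvEmit (before after : List (String × String)) (pkg : String) : List (String × String × Option String × Option String) :=
  if (PySem.Dict.mk before).get? pkg = none ∧ ¬ (PySem.Dict.mk after).get? pkg = none then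
    [(pkg, "added", none, (PySem.Dict.mk after).get? pkg)]
  else if ¬ (PySem.Dict.mk before).get? pkg = none ∧ (PySem.Dict.mk after).get? pkg = none then
    [(pkg, "removed", (PySem.Dict.mk before).get? pkg, none)]
  else if (PySem.Dict.mk before).get? pkg ≠ (PySem.Dict.mk after).get? pkg then
    [(pkg, "bumped", (PySem.Dict.mk before).get? pkg, (PySem.Dict.mk after).get? pkg)]
  else []

def pvA (before after : List (String × String)) (k : String) : Bool :=
  ((PySem.Dict.mk before).get? k).isNone && !((PySem.Dict.mk after).get? k).isNone

def pvR (before after : List (String × String)) (k : String) : Bool :=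
  !((PySem.Dict.mk before).get? k).isNone && ((PySem.Dict.mk after).get? k).isNone

def pvU (before after : List (String × String)) (k : String) : Bool :=
  !((PySem.Dict.mk before).get? k).isNone && !((PySem.Dict.mk after).get? k).isNone &&
    !((PySem.Dict.mk before).get? k == (PySem.Dict.mk after).get? k)

def pvFA (_before after : List (String × String)) (k : String) : String × String × Option String × Option String :=
  (k, "added", (none : Option String), (PySem.Dict.mk after).get? k)

def pvFR (before _after : List (String × String)) (k : String) : String × String × Option String × Option String :=
  (k, "removed", (PySem.Dict.mk before).get? k, (none : Option String))

def pvFU (before after : List (String × String)) (k : String) : String × String × Option String × Option String :=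
  (k, "bumped", (PySem.Dict.mk before).get? k, (PySem.Dict.mk after).get? k)

theorem pvEmit_eq (before after : List (String × String)) (k : String) :
    pvEmit before after k =
      (if pvA before after k then [pvFA before after k] else []) ++
      (if pvR before after k then [pvFR before after k] else []) ++
      (if pvU before after k then [pvFU before after k] else []) := by
  unfold pvEmit pvA pvR pvU pvFA pvFR pvFU
  cases hb : (PySem.Dict.mk before).get? k <;> cases ha : (PySem.Dict.mk after).get? k <;>
    simp

theorem pv_emit_fst (before after : List (String × String)) (k : String) :
    ∀ t ∈ pvEmit before after k, t.1 = k := by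
  unfold pvEmit; intro t ht; split_ifs at ht <;> simp_all

theorem pv_emit_pairwise (before after : List (String × String)) (k : String)
    (R : (String × String × Option String × Option String) → (String × String × Option String × Option String) → Prop) :
    (pvEmit before after k).Pairwise R := by
  unfold pvEmit; split_ifs <;> simp

theorem pv_flatMap_three_perm {α β : Type} (pA pR pU : α → Bool) (fA fR fU : α → β) (g : α → List β) (l : List α)
    (hg : ∀ x ∈ l, g x = (if pA x then [fA x] else []) ++ (if pR x then [fR x] else []) ++ (if pU x then [fU x] else []))
    (hex : ∀ x ∈ l, (pA x → pR x = false ∧ pU x = false) ∧ (pR x → pU x = false)) :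
    (l.flatMap g).Perm
      ((l.filter (fun x => pA x)).map fA ++
       (l.filter (fun x => pR x)).map fR ++
       (l.filter (fun x => pU x)).map fU) := by
  induction l with
  | nil => simp
  | cons x xs ih =>
    have hx := hg x (by simp)
    have hxe := hex x (by simp)
    have ih' := ih (fun y hy => hg y (by simp [hy])) (fun y hy => hex y (by simp [hy]))
    simp only [List.flatMap_cons, List.filter_cons, hx]
    by_cases hA : pA x
    · have h2 := hxe.1 hA
      simp only [hA, h2.1, h2.2, if_true, List.nil_append, List.cons_append]
      exact ih'.cons _
    · by_cases hR : pR x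
      · have hU := hxe.2 hR
        simp only [hA, hR, hU]
        refine (ih'.cons _).trans ?_
        have h := (List.perm_middle (a := fR x)
          (l₁ := (xs.filter (fun x => pA x)).map fA)
          (l₂ := (xs.filter (fun x => pR x)).map fR ++
                 (xs.filter (fun x => pU x)).map fU)).symm
        simpa [List.append_assoc] using h
      · by_cases hU : pU x
        · simp only [hA, hR, hU]
          refine (ih'.cons _).trans ?_
          have h := (List.perm_middle (a := fU x)
            (l₁ := (xs.filter (fun x => pA x)).map fA ++
                   (xs.filter (fun x => pR x)).map fR)
            (l₂ := (xs.filter (fun x => pU x)).map fU)).symm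
          simpa [List.append_assoc] using h
        · simpa [hA, hR, hU] using ih'

theorem pv_a_eq_flatMap (before after : List (String × String)) :
    diff_deps before after =
      (PySem.List.sorted
        (PySem.Set.union (PySem.Set.ofList ((PySem.Dict.mk before).keys))
          (PySem.Set.ofList ((PySem.Dict.mk after).keys))) (fun x => x) false).flatMap
        (pvEmit before after) := by
  simp only [diff_deps]
  rw [PySem.List.foldl_congr_mem _ _ (fun acc x => acc ++ pvEmit before after x) _
    (by intro acc x _; dsimp only; unfold pvEmit; split_ifs <;> simp),
    PySem.List.foldl_append_eq_flatMap]
  simp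

-- sorted union of the key sets is strictly increasing

theorem pv_sorted_lt (before after : List (String × String)) :
    (PySem.List.sorted
      (PySem.Set.union (PySem.Set.ofList ((PySem.Dict.mk before).keys))
        (PySem.Set.ofList ((PySem.Dict.mk after).keys))) (fun x => x) false).Pairwise (· < ·) := by
  have hnd : (PySem.Set.union (PySem.Set.ofList ((PySem.Dict.mk before).keys))
      (PySem.Set.ofList ((PySem.Dict.mk after).keys))).Nodup :=
    PySem.Set.nodup_union _ _ (PySem.Set.nodup_ofList _)
  have hle := PySem.List.sorted_pairwise (xs := PySem.Set.union (PySem.Set.ofList ((PySem.Dict.mk before).keys))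
      (PySem.Set.ofList ((PySem.Dict.mk after).keys))) (key := fun x => x)
  have hnd' : (PySem.List.sorted
      (PySem.Set.union (PySem.Set.ofList ((PySem.Dict.mk before).keys))
        (PySem.Set.ofList ((PySem.Dict.mk after).keys))) (fun x => x) false).Nodup :=
    (PySem.List.sorted_perm _ _ _).nodup_iff.mpr hnd
  exact (hle.and hnd').imp (fun h => lt_of_le_of_ne h.1 h.2)

theorem pv_a_pairwise (before after : List (String × String)) :
    (diff_deps before after).Pairwise (fun s t => s.1 < t.1) := by
  rw [pv_a_eq_flatMap]
  rw [List.pairwise_flatMap]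
  refine ⟨fun a _ => pv_emit_pairwise _ _ _ _, ?_⟩
  exact (pv_sorted_lt before after).imp_of_mem (by
    intro a b _ _ hab x hx y hy
    rw [pv_emit_fst before after a x hx, pv_emit_fst before after b y hy]
    exact hab)

theorem pv_keys_mk (l : List (String × String)) :
    (PySem.Dict.mk l).keys = l.map Prod.fst := by
  simp [PySem.Dict.keys]

theorem pv_added_eq (before after : List (String × String))
    (ha : (after.map Prod.fst).Nodup) :
    ((after.map Prod.fst).filter (fun k => pvA before after k)).map (pvFA before after)
    = (after.filter (fun p => !((PySem.Dict.mk before).contains p.1))).map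
        (fun p => (p.1, "added", (none : Option String), some p.2)) := by
  rw [List.filter_map, List.map_map]
  have hsome : ∀ p ∈ after, (PySem.Dict.mk after).get? p.1 = some p.2 := by
    intro p hp
    exact PySem.Dict.get?_of_mem_items (d := PySem.Dict.mk after) (by simpa using hp)
      (by simpa [pv_keys_mk] using ha)
  rw [List.filter_congr (q := fun p => !((PySem.Dict.mk before).contains p.1))
    (by intro p hp; simp [pvA, hsome p hp, PySem.Dict.contains_eq_isSome_get?, Function.comp])]
  refine List.map_congr_left ?_
  intro p hp
  have hp' : p ∈ after := List.mem_of_mem_filter hp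
  simp [pvFA, hsome p hp', Function.comp]

theorem pv_removed_eq (before after : List (String × String))
    (hb : (before.map Prod.fst).Nodup) :
    ((before.map Prod.fst).filter (fun k => pvR before after k)).map (pvFR before after)
    = (before.filter (fun p => !((PySem.Dict.mk after).contains p.1))).map
        (fun p => (p.1, "removed", some p.2, (none : Option String))) := by
  rw [List.filter_map, List.map_map]
  have hsome : ∀ p ∈ before, (PySem.Dict.mk before).get? p.1 = some p.2 := by
    intro p hp
    exact PySem.Dict.get?_of_mem_items (d := PySem.Dict.mk before) (by simpa using hp)
      (by simpa [pv_keys_mk] using hb)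
  rw [List.filter_congr (q := fun p => !((PySem.Dict.mk after).contains p.1))
    (by intro p hp; simp [pvR, hsome p hp, PySem.Dict.contains_eq_isSome_get?, Function.comp])]
  refine List.map_congr_left ?_
  intro p hp
  have hp' : p ∈ before := List.mem_of_mem_filter hp
  simp [pvFR, hsome p hp', Function.comp]

theorem pv_bumped_eq (before after : List (String × String))
    (hb : (before.map Prod.fst).Nodup) :
    ((before.map Prod.fst).filter (fun k => pvU before after k)).map (pvFU before after)
    = (before.filter (fun p => (PySem.Dict.mk after).contains p.1 &&
          !((PySem.Dict.mk after).get? p.1 == some p.2))).map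
        (fun p => (p.1, "bumped", some p.2, (PySem.Dict.mk after).get? p.1)) := by
  rw [List.filter_map, List.map_map]
  have hsome : ∀ p ∈ before, (PySem.Dict.mk before).get? p.1 = some p.2 := by
    intro p hp
    exact PySem.Dict.get?_of_mem_items (d := PySem.Dict.mk before) (by simpa using hp)
      (by simpa [pv_keys_mk] using hb)
  rw [List.filter_congr (q := fun p => (PySem.Dict.mk after).contains p.1 &&
        !((PySem.Dict.mk after).get? p.1 == some p.2))
    (by intro p hp
        simp [pvU, hsome p hp, PySem.Dict.contains_eq_isSome_get?, Function.comp]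
        cases hq : (PySem.Dict.mk after).get? p.1 <;> simp [eq_comm])]
  refine List.map_congr_left ?_
  intro p hp
  have hp' : p ∈ before := List.mem_of_mem_filter hp
  simp [pvFU, hsome p hp', Function.comp]

theorem pv_hex (before after : List (String × String)) (x : String) :
    (pvA before after x → pvR before after x = false ∧ pvU before after x = false) ∧
    (pvR before after x → pvU before after x = false) := by
  unfold pvA pvR pvU
  cases (PySem.Dict.mk before).get? x <;> cases (PySem.Dict.mk after).get? x <;> simp

-- filtering the union key set is the same (up to order) as filtering the side the
-- predicate forces membership in

theorem pv_filter_perm (before after : List (String × String)) (p : String → Bool)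
    (side : List String) (hnd : side.Nodup)
    (hside : side = before.map Prod.fst ∨ side = after.map Prod.fst)
    (hforce : ∀ x, p x = true → x ∈ side) :
    (((PySem.Set.union (PySem.Set.ofList ((PySem.Dict.mk before).keys))
        (PySem.Set.ofList ((PySem.Dict.mk after).keys))) : List String).filter p).Perm
      (side.filter p) := by
  have hndS : ((PySem.Set.union (PySem.Set.ofList ((PySem.Dict.mk before).keys))
      (PySem.Set.ofList ((PySem.Dict.mk after).keys))) : List String).Nodup :=
    PySem.Set.nodup_union _ _ (PySem.Set.nodup_ofList _)
  refine (List.perm_ext_iff_of_nodup (hndS.filter _) (hnd.filter _)).2 ?_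
  intro x
  simp only [List.mem_filter, PySem.Set.mem_union, PySem.Set.mem_ofList, pv_keys_mk]
  constructor
  · rintro ⟨-, hpx⟩; exact ⟨hforce x hpx, hpx⟩
  · rintro ⟨hx, hpx⟩
    refine ⟨?_, hpx⟩
    rcases hside with h | h <;> rw [h] at hx
    · exact Or.inl hx
    · exact Or.inr hx

theorem pv_force_A (before after : List (String × String)) (x : String) :
    pvA before after x = true → x ∈ after.map Prod.fst := by
  intro h
  unfold pvA at h
  have : ¬ (PySem.Dict.mk after).get? x = none := by
    cases hq : (PySem.Dict.mk after).get? x <;> simp_all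
  simpa [pv_keys_mk] using
    (not_not.1 (fun hc => this ((PySem.Dict.get?_eq_none_iff_not_mem_keys _ _).2 (by simpa [pv_keys_mk] using hc))))

theorem pv_force_R (before after : List (String × String)) (x : String) :
    pvR before after x = true → x ∈ before.map Prod.fst := by
  intro h
  unfold pvR at h
  have : ¬ (PySem.Dict.mk before).get? x = none := by
    cases hq : (PySem.Dict.mk before).get? x <;> simp_all
  simpa [pv_keys_mk] using
    (not_not.1 (fun hc => this ((PySem.Dict.get?_eq_none_iff_not_mem_keys _ _).2 (by simpa [pv_keys_mk] using hc))))

theorem pv_force_U (before after : List (String × String)) (x : String) :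
    pvU before after x = true → x ∈ before.map Prod.fst := by
  intro h
  unfold pvU at h
  have : ¬ (PySem.Dict.mk before).get? x = none := by
    cases hq : (PySem.Dict.mk before).get? x <;> simp_all
  simpa [pv_keys_mk] using
    (not_not.1 (fun hc => this ((PySem.Dict.get?_eq_none_iff_not_mem_keys _ _).2 (by simpa [pv_keys_mk] using hc))))

theorem diff_deps_spec' (before after : List (String × String))
    (hb : (before.map Prod.fst).Nodup) (ha : (after.map Prod.fst).Nodup) :
    diff_deps before after = diff_deps_alt before after := by
  simp only [diff_deps_alt]
  refine (PySem.List.sorted_eq_of_perm_of_pairwise_lt _ _ _ ?_ ?_).symm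
  · -- permutation
    rw [pv_a_eq_flatMap]
    refine (List.Perm.flatMap_right (pvEmit before after)
      (PySem.List.sorted_perm _ _ _)).trans ?_
    refine (pv_flatMap_three_perm (pvA before after) (pvR before after) (pvU before after)
      (pvFA before after) (pvFR before after) (pvFU before after) (pvEmit before after) _
      (fun x _ => pvEmit_eq before after x) (fun x _ => pv_hex before after x)).trans ?_
    refine List.Perm.append (List.Perm.append ?_ ?_) ?_
    · exact ((pv_filter_perm before after _ _ ha (Or.inr rfl)
        (pv_force_A before after)).map _).trans (by rw [pv_added_eq before after ha])
    · exact ((pv_filter_perm before after _ _ hb (Or.inl rfl)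
        (pv_force_R before after)).map _).trans (by rw [pv_removed_eq before after hb])
    · exact ((pv_filter_perm before after _ _ hb (Or.inl rfl)
        (pv_force_U before after)).map _).trans (by rw [pv_bumped_eq before after hb])
  · exact pv_a_pairwise before after

-- ===== VERDICT (by name: the statement is the Claim_ definition above) =====
theorem diff_deps_spec : Claim_equal_diff_deps := by
  intro before after _ hpre
  unfold Pre_diff_deps at hpre
  unfold Spec_diff_deps
  exact diff_deps_spec' before after hpre.1 hpre.2
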